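-- pv_equiv track=rewrite | github.com/juseitor/jijiji | guia7.py | cambioPosicionesPares
-- ===== SOURCE A (Python) =====
-- def cambioPosicionesPares(s:list) -> list :
--     t : list = []
--     for i in range(0,len(s),1) :
--         if i % 2 == 0 :
--             t.append(s[i])
--         else :
--             t.append(0)
--     return t
-- ===== SOURCE B (Python) =====
-- def cambioPosicionesPares(s: list) -> list:
--     if not s:
--         return []
--     if len(s) == 1:
--         return [s[0]]
--     return [s[0], 0] + cambioPosicionesPares(s[2:])
-- ===== Notes on version B (the rewrite author's own statement) =====
-- stated objective: alternative
-- what changed: Replaces A's indexed loop with per-index parity test by a structural recursion that consumes the list two elements at a time, keeping the first and zeroing the second, so no index arithmetic is needed.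
import Mathlib
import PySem

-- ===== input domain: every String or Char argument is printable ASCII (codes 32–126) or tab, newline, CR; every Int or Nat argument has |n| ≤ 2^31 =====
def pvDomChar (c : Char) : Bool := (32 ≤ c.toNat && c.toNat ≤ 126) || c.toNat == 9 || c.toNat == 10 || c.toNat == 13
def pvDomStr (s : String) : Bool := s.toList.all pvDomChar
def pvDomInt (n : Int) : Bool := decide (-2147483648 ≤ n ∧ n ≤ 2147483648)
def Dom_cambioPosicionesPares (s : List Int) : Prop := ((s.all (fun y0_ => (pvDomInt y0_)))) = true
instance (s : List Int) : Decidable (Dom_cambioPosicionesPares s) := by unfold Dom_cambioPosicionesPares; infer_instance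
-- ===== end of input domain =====

-- B replaces A's indexed loop with per-index parity test by a structural recursion
-- consuming the list two elements at a time (keep the first, zero the second);
-- objective: an alternative decomposition with no index arithmetic, same O(n) cost.

-- ===== PORT A =====
-- t = []; for i in range(0, len(s), 1): append s[i] if i even else 0
def cambioPosicionesPares (s : List Int) : List Int :=
  (PySem.List.pyRange 0 (PySem.List.len s) 1).foldl
    (fun t i => t ++ [if PySem.Int.mod i 2 = 0 then PySem.List.pyGetD s i 0 else 0]) []

-- ===== PORT B =====
-- if not s: []; if len(s)==1: [s[0]]; else [s[0], 0] + recurse on s[2:]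
def cambioPosicionesPares_alt : List Int → List Int
  | [] => []
  | [a] => [a]
  | a :: _ :: rest => a :: 0 :: cambioPosicionesPares_alt rest

-- ===== PRECONDITION & SPEC =====
def Spec_cambioPosicionesPares (s : List Int) (out : List Int) : Prop := out = cambioPosicionesPares_alt s
instance (s : List Int) (out : List Int) : Decidable (Spec_cambioPosicionesPares s out) := by unfold Spec_cambioPosicionesPares; infer_instance

-- ===== CLAIM (what is proved, stated in full; the proofs are below) =====
def Claim_equal_cambioPosicionesPares : Prop := ∀ (s : List Int), Dom_cambioPosicionesPares s → Spec_cambioPosicionesPares s (cambioPosicionesPares s)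

-- ===== LEMMAS AND PROOFS =====

-- element j of B's result: the original element at even j, 0 at odd j in range
theorem alt_getElem? (s : List Int) (j : Nat) :
    (cambioPosicionesPares_alt s)[j]? =
      if j % 2 = 0 then s[j]? else (if j < s.length then some 0 else none) := by
  induction s using cambioPosicionesPares_alt.induct generalizing j with
  | case1 => simp [cambioPosicionesPares_alt]
  | case2 a =>
    match j with
    | 0 => simp [cambioPosicionesPares_alt]
    | 1 => simp [cambioPosicionesPares_alt]
    | j + 2 => simp [cambioPosicionesPares_alt, Nat.add_mod_right]
  | case3 a b rest ih =>
    match j with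
    | 0 => simp [cambioPosicionesPares_alt]
    | 1 => simp [cambioPosicionesPares_alt]
    | j + 2 =>
      simp only [cambioPosicionesPares_alt, List.getElem?_cons_succ, ih j,
        Nat.add_mod_right, List.length_cons, Nat.add_lt_add_iff_right]

-- ===== VERDICT (by name: the statement is the Claim_ definition above) =====
theorem cambioPosicionesPares_spec : Claim_equal_cambioPosicionesPares := by
  intro s _
  unfold Spec_cambioPosicionesPares cambioPosicionesPares
  rw [PySem.List.foldl_append_singleton_eq_map, List.nil_append]
  apply List.ext_getElem?
  intro j
  rw [alt_getElem?]
  by_cases hj : j < s.length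
  · have hA : (List.map (fun i => if PySem.Int.mod i 2 = 0 then PySem.List.pyGetD s i 0 else 0)
        (PySem.List.pyRange 0 (PySem.List.len s) 1))[j]? =
        some (if PySem.Int.mod (j : Int) 2 = 0 then PySem.List.pyGetD s (j : Int) 0 else 0) := by
      rw [PySem.List.len_eq]
      exact PySem.List.getElem?_map_pyRange_zero _ s.length j hj
    rw [hA]
    by_cases hpar : PySem.Int.mod (j : Int) 2 = 0
    · have hmod : ((j : Int) % 2 = 0) := by
        have := hpar; simpa [PySem.Int.mod_eq_emod_of_pos (by norm_num : (0:Int) < 2)] using this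
      have hjn : j % 2 = 0 := by omega
      rw [if_pos hpar, if_pos hjn]
      rw [PySem.List.pyGetD_eq_getElem s 0 (by omega)
        (by simpa using (by exact_mod_cast hj : (j:Int) < (s.length : Int)))]
      simp [hj]
    · have hmod : ((j : Int) % 2 = 1) := by
        rcases PySem.Int.mod_two_eq (j : Int) with h | h
        · exact absurd h hpar
        · simpa [PySem.Int.mod_eq_emod_of_pos (by norm_num : (0:Int) < 2)] using h
      have hjn : ¬ (j % 2 = 0) := by omega
      rw [if_neg hpar, if_neg hjn, if_pos hj]
  · have h1 : (List.map (fun i => if PySem.Int.mod i 2 = 0 then PySem.List.pyGetD s i 0 else 0)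
        (PySem.List.pyRange 0 (PySem.List.len s) 1))[j]? = none := by
      rw [List.getElem?_eq_none]
      simp [PySem.List.length_pyRange_one, PySem.List.len]; omega
    rw [h1]
    split_ifs with h
    · rw [List.getElem?_eq_none (by omega)]
    · rfl
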